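-- pv_equiv track=rewrite | github.com/akkrn/tarot_bot | bot/services/utils.py | find_or_insert_newline
-- ===== SOURCE A (Python) =====
-- def find_or_insert_newline(text: str) -> [str, str]:
--     mid_index = len(text) // 2
--     if "\n" in text:
--         newline_indices = [i for i, char in enumerate(text) if char == "\n"]
--         closest_newline = min(
--             newline_indices, key=lambda x: abs(x - mid_index)
--         )
--         return text[: closest_newline + 1], text[closest_newline + 1 :]
--     else:
--         return text, "\n"
-- ===== SOURCE B (Python) =====
-- def find_or_insert_newline(text: str) -> [str, str]:
--     if "\n" not in text:
--         return text, "\n"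
--     mid = len(text) // 2
--     for d in range(len(text) + 1):
--         i = mid - d
--         if i >= 0 and text[i] == "\n":
--             return text[: i + 1], text[i + 1 :]
--         j = mid + d
--         if j < len(text) and text[j] == "\n":
--             return text[: j + 1], text[j + 1 :]
--     return text, "\n"  # unreachable: text contains "\n"
-- ===== Notes on version B (the rewrite author's own statement) =====
-- stated objective: alternative
-- what changed: Instead of materialising the list of all newline positions and taking min by distance to the midpoint, B searches outward from the midpoint (checking mid-d before mid+d for growing d) and splits at the first newline found, after a single containment check.
import Mathlib
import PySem

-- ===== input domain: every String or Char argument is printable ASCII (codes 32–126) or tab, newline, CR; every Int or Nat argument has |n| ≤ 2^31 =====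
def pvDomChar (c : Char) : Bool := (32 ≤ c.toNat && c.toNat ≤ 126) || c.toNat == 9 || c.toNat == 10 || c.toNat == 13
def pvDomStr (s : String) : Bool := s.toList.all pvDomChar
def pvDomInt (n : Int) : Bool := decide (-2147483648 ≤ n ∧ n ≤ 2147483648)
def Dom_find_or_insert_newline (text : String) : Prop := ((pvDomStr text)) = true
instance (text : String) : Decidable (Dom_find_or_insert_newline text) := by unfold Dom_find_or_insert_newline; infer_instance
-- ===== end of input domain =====

-- B replaces A's full list of newline positions + min-by-distance with an outward
-- search from the midpoint (left candidate first, so ties go to the smaller index);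
-- objective: alternative (same worst-case cost, no index list built).

-- ===== PORT A =====
def find_or_insert_newline (text : String) : String × String :=
  let mid_index : Int := PySem.Int.floordiv (PySem.Str.len text) 2
  if PySem.Str.isIn "\n" text then
    let newline_indices : List Int :=
      ((PySem.List.enumerate text.toList).filter (fun p => p.2 == '\n')).map (fun p => p.1)
    match PySem.List.min? newline_indices (fun x => |x - mid_index|) with
    | some closest_newline =>
        (PySem.Str.slice text none (some (closest_newline + 1)),
         PySem.Str.slice text (some (closest_newline + 1)) none)
    | none => (text, "\n")  -- unreachable: "\n" in text, so the list is nonempty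
  else
    (text, "\n")

-- ===== PORT B =====
-- the `for d in range(len(text)+1)` loop of Source B: fuel = number of remaining iterations
def pvRing (cs : List Char) (mid : Int) : Nat → Int → Option Int
  | 0, _ => none
  | fuel + 1, d =>
    if 0 ≤ mid - d ∧ PySem.List.pyGet? cs (mid - d) = some '\n' then some (mid - d)
    else if mid + d < (cs.length : Int) ∧ PySem.List.pyGet? cs (mid + d) = some '\n' then
      some (mid + d)
    else pvRing cs mid fuel (d + 1)

def find_or_insert_newline_alt (text : String) : String × String :=
  if PySem.Str.isIn "\n" text = false then (text, "\n")
  else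
    let mid : Int := PySem.Int.floordiv (PySem.Str.len text) 2
    match pvRing text.toList mid (text.toList.length + 1) 0 with
    | some i =>
        (PySem.Str.slice text none (some (i + 1)),
         PySem.Str.slice text (some (i + 1)) none)
    | none => (text, "\n")  -- unreachable: text contains "\n"

-- ===== PRECONDITION & SPEC =====
def Spec_find_or_insert_newline (text : String) (out : String × String) : Prop := out = find_or_insert_newline_alt text
instance (text : String) (out : String × String) : Decidable (Spec_find_or_insert_newline text out) := by unfold Spec_find_or_insert_newline; infer_instance

-- ===== CLAIM (what is proved, stated in full; the proofs are below) =====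
def Claim_equal_find_or_insert_newline : Prop := ∀ (text : String), Dom_find_or_insert_newline text → Spec_find_or_insert_newline text (find_or_insert_newline text)

-- ===== LEMMAS AND PROOFS =====

-- `k is a newline position of cs` (Int index, Python-nonnegative form)
def pvNL (cs : List Char) (k : Int) : Prop := 0 ≤ k ∧ cs[k.toNat]? = some '\n'

theorem pvGet_nonneg (cs : List Char) (i : Int) (h : 0 ≤ i) :
    PySem.List.pyGet? cs i = cs[i.toNat]? := by
  simp only [PySem.List.pyGet?, PySem.List.pyIdx?, if_pos h]
  split_ifs with h2
  · simp
  · rw [List.getElem?_eq_none (by omega)]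
    simp

theorem pvNL_lt (cs : List Char) (k : Int) (h : pvNL cs k) : k < (cs.length : Int) := by
  obtain ⟨h1, h2⟩ := h
  by_contra hbig
  rw [List.getElem?_eq_none (by omega)] at h2
  simp at h2

-- membership in A's newline_indices list
theorem pvMemI (cs : List Char) (x : Int) :
    x ∈ ((PySem.List.enumerate cs).filter (fun p => p.2 == '\n')).map (fun p => p.1) ↔
      pvNL cs x := by
  constructor
  · intro hx
    rw [List.mem_map] at hx
    obtain ⟨p, hpf, hx⟩ := hx
    rw [List.mem_filter] at hpf
    obtain ⟨hpe, hnl⟩ := hpf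
    rw [PySem.List.mem_enumerate_iff] at hpe
    obtain ⟨k, hk, rfl⟩ := hpe
    simp only at hx
    simp only [beq_iff_eq] at hnl
    subst hx
    refine ⟨by positivity, ?_⟩
    have hk' : ((0 + (k : Int)).toNat) = k := by omega
    rw [hk', List.getElem?_eq_getElem hk, hnl]
  · rintro ⟨hx, hget⟩
    have hlt : x.toNat < cs.length := by
      by_contra hc
      rw [List.getElem?_eq_none (by omega)] at hget
      simp at hget
    refine List.mem_map.mpr ⟨(x, '\n'), ?_, rfl⟩
    rw [List.mem_filter]
    refine ⟨(PySem.List.mem_enumerate_iff ..).mpr ⟨x.toNat, hlt, ?_⟩, by simp⟩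
    have hchar : cs[x.toNat] = '\n' := by
      rw [List.getElem?_eq_getElem hlt] at hget
      exact Option.some.inj hget
    rw [Prod.mk.injEq]
    exact ⟨by omega, hchar.symm⟩

theorem pvPairwiseI (cs : List Char) :
    (((PySem.List.enumerate cs).filter (fun p => p.2 == '\n')).map
      (fun p : Int × Char => p.1)).Pairwise (· < ·) := by
  refine List.Pairwise.map _ (fun a b h => h) ?_
  exact (PySem.List.pairwise_lt_enumerate cs 0).filter _

theorem pvMinCons (key : Int → Int) (a x : Int) (t : List Int) :
    PySem.List.min? (a :: x :: t) key =
      if key x < key a then PySem.List.min? (x :: t) key else PySem.List.min? (a :: t) key := by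
  simp only [PySem.List.min?, List.foldl_cons]
  split_ifs <;> rfl

-- the strict-improvement fold of PySem.List.min? returns the FIRST minimiser;
-- on a strictly increasing list that is the SMALLEST minimiser
theorem pvMinAux (key : Int → Int) (t : List Int) (a m : Int)
    (hp : t.Pairwise (· < ·)) (hlt : ∀ y ∈ t, a < y)
    (h : PySem.List.min? (a :: t) key = some m) :
    (m = a ∧ ∀ y ∈ t, key a ≤ key y) ∨
      (m ∈ t ∧ key m < key a ∧ ∀ y ∈ t, key m < key y ∨ (key m = key y ∧ m ≤ y)) := by
  induction t generalizing a with
  | nil =>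
    have h' : some a = some m := h
    exact Or.inl ⟨(Option.some.inj h').symm, by simp⟩
  | cons x t' ih =>
    rw [pvMinCons] at h
    rw [List.pairwise_cons] at hp
    by_cases hx : key x < key a
    · rw [if_pos hx] at h
      rcases ih x hp.2 hp.1 h with ⟨hm, hmin⟩ | ⟨hmem, hklt, hall⟩
      · subst hm
        refine Or.inr ⟨List.mem_cons_self, hx, ?_⟩
        intro y hy
        rcases List.mem_cons.mp hy with rfl | hy'
        · exact Or.inr ⟨rfl, le_refl _⟩
        · rcases lt_or_eq_of_le (hmin y hy') with hlt' | heq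
          · exact Or.inl hlt'
          · exact Or.inr ⟨heq, le_of_lt (hp.1 y hy')⟩
      · refine Or.inr ⟨List.mem_cons_of_mem _ hmem, lt_trans hklt hx, ?_⟩
        intro y hy
        rcases List.mem_cons.mp hy with rfl | hy'
        · exact Or.inl hklt
        · exact hall y hy'
    · rw [if_neg hx] at h
      push Not at hx
      have hlt' : ∀ y ∈ t', a < y := fun y hy => hlt y (List.mem_cons_of_mem _ hy)
      rcases ih a hp.2 hlt' h with ⟨hm, hmin⟩ | ⟨hmem, hklt, hall⟩
      · refine Or.inl ⟨hm, ?_⟩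
        intro y hy
        rcases List.mem_cons.mp hy with rfl | hy'
        · exact hx
        · exact hmin y hy'
      · refine Or.inr ⟨List.mem_cons_of_mem _ hmem, hklt, ?_⟩
        intro y hy
        rcases List.mem_cons.mp hy with rfl | hy'
        · exact Or.inl (lt_of_lt_of_le hklt hx)
        · exact hall y hy'

theorem pvMinArgmin (key : Int → Int) (xs : List Int) (m : Int)
    (hp : xs.Pairwise (· < ·)) (h : PySem.List.min? xs key = some m) :
    m ∈ xs ∧ ∀ y ∈ xs, key m < key y ∨ (key m = key y ∧ m ≤ y) := by
  cases xs with
  | nil => simp [PySem.List.min?] at h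
  | cons x t =>
    rw [List.pairwise_cons] at hp
    rcases pvMinAux key t x m hp.2 hp.1 h with ⟨hm, hmin⟩ | ⟨hmem, hklt, hall⟩
    · subst hm
      refine ⟨List.mem_cons_self, ?_⟩
      intro y hy
      rcases List.mem_cons.mp hy with rfl | hy'
      · exact Or.inr ⟨rfl, le_refl _⟩
      · rcases lt_or_eq_of_le (hmin y hy') with hlt' | heq
        · exact Or.inl hlt'
        · exact Or.inr ⟨heq, le_of_lt (hp.1 y hy')⟩
    · refine ⟨List.mem_cons_of_mem _ hmem, ?_⟩
      intro y hy
      rcases List.mem_cons.mp hy with rfl | hy'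
      · exact Or.inl hklt
      · exact hall y hy'

-- correctness of the outward search: it finds exactly the first minimiser c
theorem pvRingCorrect (cs : List Char) (mid c : Int) (hmid : 0 ≤ mid)
    (hc : pvNL cs c)
    (hmin : ∀ y, pvNL cs y → |c - mid| < |y - mid| ∨ (|c - mid| = |y - mid| ∧ c ≤ y)) :
    ∀ (fuel : Nat) (d : Int), 0 ≤ d → (∀ y, pvNL cs y → d ≤ |y - mid|) →
      |c - mid| < d + fuel → pvRing cs mid fuel d = some c := by
  intro fuel
  induction fuel with
  | zero =>
    intro d _ hinv hbound
    have := hinv c hc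
    simp only [Nat.cast_zero] at hbound
    omega
  | succ f ih =>
    intro d hd hinv hbound
    have habs : ∀ y : Int, |y - mid| = d → y = mid - d ∨ y = mid + d := by
      intro y hy
      rcases abs_cases (y - mid) with ⟨h1, _⟩ | ⟨h1, _⟩ <;> omega
    rw [pvRing]
    by_cases h1 : 0 ≤ mid - d ∧ PySem.List.pyGet? cs (mid - d) = some '\n'
    · rw [if_pos h1]
      have hnl1 : pvNL cs (mid - d) := ⟨h1.1, by rw [← pvGet_nonneg cs _ h1.1]; exact h1.2⟩
      have hcd : d ≤ |c - mid| := hinv c hc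
      have habs1 : |mid - d - mid| = d := by rw [abs_of_nonpos (by omega)]; ring
      rcases hmin (mid - d) hnl1 with hlt1 | ⟨heq, hle⟩
      · omega
      · have hcabs : |c - mid| = d := by omega
        rcases habs c hcabs with rfl | rfl
        · rfl
        · have hd0 : d = 0 := by omega
          subst hd0
          norm_num
    · rw [if_neg h1]
      by_cases h2 : mid + d < (cs.length : Int) ∧ PySem.List.pyGet? cs (mid + d) = some '\n'
      · rw [if_pos h2]
        have hnl2 : pvNL cs (mid + d) :=
          ⟨by omega, by rw [← pvGet_nonneg cs _ (by omega : (0:Int) ≤ mid + d)]; exact h2.2⟩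
        have hcd : d ≤ |c - mid| := hinv c hc
        have habs2 : |mid + d - mid| = d := by rw [abs_of_nonneg (by omega)]; ring
        have hcabs : |c - mid| = d := by
          rcases hmin (mid + d) hnl2 with hlt2 | ⟨heq, _⟩ <;> omega
        rcases habs c hcabs with rfl | rfl
        · exact absurd ⟨hc.1, by rw [pvGet_nonneg cs _ hc.1]; exact hc.2⟩ h1
        · rfl
      · rw [if_neg h2]
        refine ih (d + 1) (by omega) ?_ (by push_cast at hbound ⊢; omega)
        intro y hy
        have hge := hinv y hy
        by_contra hcon
        have hyd : |y - mid| = d := by omega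
        have hget : PySem.List.pyGet? cs y = some '\n' := by
          rw [pvGet_nonneg cs _ hy.1]; exact hy.2
        have hylen : y < (cs.length : Int) := pvNL_lt cs y hy
        rcases habs y hyd with rfl | rfl
        · exact h1 ⟨hy.1, hget⟩
        · exact h2 ⟨hylen, hget⟩

-- ===== VERDICT (by name: the statement is the Claim_ definition above) =====
theorem find_or_insert_newline_spec : Claim_equal_find_or_insert_newline := by
  intro text _
  unfold Spec_find_or_insert_newline find_or_insert_newline find_or_insert_newline_alt
  cases hb : PySem.Str.isIn "\n" text with
  | false =>
    rw [if_pos rfl]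
    rfl
  | true =>
    rw [if_pos rfl, if_neg (by decide : ¬((true : Bool) = false))]
    set cs := text.toList with hcs
    set mid : Int := PySem.Int.floordiv (PySem.Str.len text) 2 with hmid
    have hmid' : mid = ((cs.length / 2 : Nat) : Int) := by
      rw [hmid, PySem.Str.len_eq, ← hcs]
      exact_mod_cast PySem.Int.floordiv_natCast cs.length 2
    have hmem : '\n' ∈ cs := by
      have hinf := (PySem.Str.isIn_iff_infix "\n" text).mp hb
      exact (List.singleton_infix_iff '\n' cs).mp (by simpa using hinf)
    set I : List Int :=
      ((PySem.List.enumerate cs).filter (fun p => p.2 == '\n')).map (fun p => p.1) with hI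
    have hIne : I ≠ [] := by
      obtain ⟨k, hk, hget⟩ := List.mem_iff_getElem.mp hmem
      intro hnil
      have hkmem : (k : Int) ∈ I := (pvMemI cs k).mpr
        ⟨by positivity, by simp [List.getElem?_eq_getElem hk, hget]⟩
      rw [hnil] at hkmem
      exact absurd hkmem (List.not_mem_nil)
    obtain ⟨c, hcmin⟩ : ∃ c, PySem.List.min? I (fun x => |x - mid|) = some c := by
      cases h : PySem.List.min? I (fun x => |x - mid|) with
      | none => exact absurd ((PySem.List.min?_eq_none_iff I _).mp h) hIne
      | some c => exact ⟨c, rfl⟩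
    obtain ⟨hcmem, hcall⟩ := pvMinArgmin _ I c (pvPairwiseI cs) hcmin
    have hcNL : pvNL cs c := (pvMemI cs c).mp hcmem
    have hcbound : c < (cs.length : Int) := pvNL_lt cs c hcNL
    have hc0 : 0 ≤ c := hcNL.1
    have hring : pvRing cs mid (cs.length + 1) 0 = some c := by
      refine pvRingCorrect cs mid c (by omega) hcNL
        (fun y hy => hcall y ((pvMemI cs y).mpr hy)) (cs.length + 1) 0 (le_refl 0)
        (fun y _ => abs_nonneg _) ?_
      rcases abs_cases (c - mid) with ⟨h1, _⟩ | ⟨h1, _⟩ <;> push_cast <;> omega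
    simp only [hcmin, hring]
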